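-- pv_equiv track=rewrite | github.com/nvs4a3/code_test | arrow_turns.py | solution
-- ===== SOURCE A (Python) =====
-- def solution(S):
--     #Define a default map that stores the count of each direction count
--     arrow_dict = {'<':0, '>':0, '^':0, 'v':0 }
--
--     for char in S:
--         if char == '<':
--             arrow_dict['<']+=1
--         elif char == '>':
--             arrow_dict['>']+=1
--         elif char == '^':
--             arrow_dict['^']+=1
--         elif char == 'v':
--             arrow_dict['v']+=1
--
--     count_of_arrows = arrow_dict.values()
--     max_arrow_count = max(count_of_arrows)
--     if max_arrow_count == len(S):
--         return 0
--     else: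
--         return len(S)-max_arrow_count
-- ===== SOURCE B (Python) =====
-- def solution(S):
--     # Sort the arrow characters so equal directions form contiguous runs,
--     # then scan once for the longest run; the answer is len(S) minus that run.
--     arrows = sorted(c for c in S if c in '<>^v')
--     best = 0
--     run = 0
--     prev = None
--     for ch in arrows:
--         run = run + 1 if ch == prev else 1
--         if run > best:
--             best = run
--         prev = ch
--     return len(S) - best
-- ===== Notes on version B (the rewrite author's own statement) =====
-- stated objective: alternative
-- what changed: Replaced A's per-character dict-accumulation (and its redundant max==len branch) with sort-then-scan: sort the arrow characters so equal directions become contiguous runs, find the longest run in one scan, and return len(S) minus it — correct because the longest run of a sorted list is exactly the most common element's count.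
import Mathlib
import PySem

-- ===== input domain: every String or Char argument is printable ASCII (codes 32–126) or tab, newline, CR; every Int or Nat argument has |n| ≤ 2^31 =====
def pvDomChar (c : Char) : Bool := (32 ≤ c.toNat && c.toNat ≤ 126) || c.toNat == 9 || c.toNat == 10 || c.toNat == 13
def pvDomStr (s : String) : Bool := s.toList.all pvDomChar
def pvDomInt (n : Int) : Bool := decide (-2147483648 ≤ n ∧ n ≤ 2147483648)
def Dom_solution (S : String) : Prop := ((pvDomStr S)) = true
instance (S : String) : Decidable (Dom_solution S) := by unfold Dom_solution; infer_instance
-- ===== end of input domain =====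

-- B replaces A's per-character dict-accumulation loop (and its redundant max==len branch)
-- with a different algorithm: sort the arrow characters, scan once for the longest run,
-- and return len(S) minus that run length.


-- ===== PORT A =====
-- the loop body: one branch per arrow character (arrow_dict[c] += 1); the keys always exist
def solutionStep (d : PySem.Dict Char Int) (c : Char) : PySem.Dict Char Int :=
  if c = '<' then d.insert '<' (d.getD '<' 0 + 1)
  else if c = '>' then d.insert '>' (d.getD '>' 0 + 1)
  else if c = '^' then d.insert '^' (d.getD '^' 0 + 1)
  else if c = 'v' then d.insert 'v' (d.getD 'v' 0 + 1)
  else d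

def solution (S : String) : Int :=
  let arrow_dict : PySem.Dict Char Int := PySem.Dict.ofList [('<', 0), ('>', 0), ('^', 0), ('v', 0)]
  let arrow_dict := S.toList.foldl solutionStep arrow_dict
  let count_of_arrows := arrow_dict.values
  -- max() over the four dict values; the list is never empty so Python's max never raises
  let max_arrow_count := (PySem.List.max? count_of_arrows (fun x => x)).getD 0
  if max_arrow_count = (PySem.Str.len S : Int) then 0
  else (PySem.Str.len S : Int) - max_arrow_count

-- ===== PORT B =====
-- loop body: run = run + 1 if ch == prev else 1; best = max(best, run); prev = ch
def altStep (st : Int × Int × Option Char) (ch : Char) : Int × Int × Option Char :=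
  let run := if some ch = st.2.2 then st.2.1 + 1 else 1
  let best := if st.1 < run then run else st.1
  (best, run, some ch)

def solution_alt (S : String) : Int :=
  -- arrows = sorted(c for c in S if c in '<>^v')
  let arrows := PySem.List.sorted (S.toList.filter (fun c => ("<>^v".toList).contains c)) (fun x => x) false
  let st := arrows.foldl altStep (0, 0, none)
  (PySem.Str.len S : Int) - st.1

-- ===== PRECONDITION & SPEC =====
def Spec_solution (S : String) (out : Int) : Prop := out = solution_alt S
instance (S : String) (out : Int) : Decidable (Spec_solution S out) := by unfold Spec_solution; infer_instance

-- ===== CLAIM (what is proved, stated in full; the proofs are below) =====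
def Claim_equal_solution : Prop := ∀ (S : String), Dom_solution S → Spec_solution S (solution S)

-- ===== LEMMAS AND PROOFS =====

-- A's loop keeps the dict literally in shape [('<',a),('>',b),('^',c),('v',d)], adding the counts
lemma solution_loop (l : List Char) : ∀ (a b c d : Int),
    l.foldl solutionStep (PySem.Dict.ofList [('<', a), ('>', b), ('^', c), ('v', d)]) =
      PySem.Dict.ofList [('<', a + l.count '<'), ('>', b + l.count '>'),
                         ('^', c + l.count '^'), ('v', d + l.count 'v')] := by
  induction l with
  | nil => intro a b c d; simp
  | cons h t ih =>
    intro a b c d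
    by_cases h1 : h = '<'
    · subst h1
      show t.foldl solutionStep (solutionStep _ '<') = _
      rw [show solutionStep (PySem.Dict.ofList [('<', a), ('>', b), ('^', c), ('v', d)]) '<' =
            PySem.Dict.ofList [('<', a + 1), ('>', b), ('^', c), ('v', d)] from rfl]
      rw [ih]; simp; ring_nf
    · by_cases h2 : h = '>'
      · subst h2
        show t.foldl solutionStep (solutionStep _ '>') = _
        rw [show solutionStep (PySem.Dict.ofList [('<', a), ('>', b), ('^', c), ('v', d)]) '>' =
              PySem.Dict.ofList [('<', a), ('>', b + 1), ('^', c), ('v', d)] from rfl]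
        rw [ih]; simp [h1]; ring_nf
      · by_cases h3 : h = '^'
        · subst h3
          show t.foldl solutionStep (solutionStep _ '^') = _
          rw [show solutionStep (PySem.Dict.ofList [('<', a), ('>', b), ('^', c), ('v', d)]) '^' =
                PySem.Dict.ofList [('<', a), ('>', b), ('^', c + 1), ('v', d)] from rfl]
          rw [ih]; simp [h1, h2]; ring_nf
        · by_cases h4 : h = 'v'
          · subst h4
            show t.foldl solutionStep (solutionStep _ 'v') = _
            rw [show solutionStep (PySem.Dict.ofList [('<', a), ('>', b), ('^', c), ('v', d)]) 'v' =
                  PySem.Dict.ofList [('<', a), ('>', b), ('^', c), ('v', d + 1)] from rfl]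
            rw [ih]; simp [h1, h2, h3]; ring_nf
          · show t.foldl solutionStep (solutionStep _ h) = _
            rw [show solutionStep (PySem.Dict.ofList [('<', a), ('>', b), ('^', c), ('v', d)]) h =
                  PySem.Dict.ofList [('<', a), ('>', b), ('^', c), ('v', d)] by
                simp [solutionStep, h1, h2, h3, h4]]
            rw [ih]; simp [h1, h2, h3, h4]

-- the sorted filtered list is exactly the four replicate blocks, in character order
lemma sorted_arrows (l : List Char) :
    PySem.List.sorted (l.filter (fun c => ("<>^v".toList).contains c)) (fun x => x) false =
      List.replicate (l.count '<') '<' ++ List.replicate (l.count '>') '>' ++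
      List.replicate (l.count '^') '^' ++ List.replicate (l.count 'v') 'v' := by
  apply PySem.List.sorted_id_eq_of_perm_of_pairwise
  · rw [List.perm_iff_count]
    intro x
    by_cases h1 : x = '<'
    · subst h1; simp [List.count_append, List.count_replicate, List.count_filter]
    · by_cases h2 : x = '>'
      · subst h2; simp [List.count_append, List.count_replicate, List.count_filter]
      · by_cases h3 : x = '^'
        · subst h3; simp [List.count_append, List.count_replicate, List.count_filter]
        · by_cases h4 : x = 'v'
          · subst h4; simp [List.count_append, List.count_replicate, List.count_filter]
          · have e1 : ¬('<' = x) := fun h => h1 h.symm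
            have e2 : ¬('>' = x) := fun h => h2 h.symm
            have e3 : ¬('^' = x) := fun h => h3 h.symm
            have e4 : ¬('v' = x) := fun h => h4 h.symm
            simp [List.count_append, List.count_replicate, e1, e2, e3, e4]
            symm
            rw [List.count_eq_zero]
            intro hmem
            have hpx := (List.mem_filter.1 hmem).2
            simp [h1, h2, h3, h4] at hpx
  · simp only [List.pairwise_append, List.mem_append, List.mem_replicate]
    refine ⟨⟨⟨List.pairwise_replicate.2 (by simp), List.pairwise_replicate.2 (by simp), ?_⟩,
      List.pairwise_replicate.2 (by simp), ?_⟩, List.pairwise_replicate.2 (by simp), ?_⟩ <;>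
      (intro x hx y hy; obtain ⟨-, rfl⟩ := hy;
       first
         | (rcases hx with (⟨-, rfl⟩ | ⟨-, rfl⟩) | ⟨-, rfl⟩ <;> decide)
         | (rcases hx with ⟨-, rfl⟩ | ⟨-, rfl⟩ <;> decide)
         | (obtain ⟨-, rfl⟩ := hx; decide))

-- B's scan over a replicate block: with a fresh previous character it yields (max best k, k, some c)
-- inside a block: the run keeps growing, the best keeps the running maximum
lemma altStep_run (c : Char) : ∀ (k : Nat) (best run : Int), run ≤ best →
    (List.replicate k c).foldl altStep (best, run, some c) =
      (max best (run + k), run + k, some c) := by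
  intro k
  induction k with
  | zero => intro best run h; simp; omega
  | succ n ih =>
    intro best run h
    rw [List.replicate_succ, List.foldl_cons,
      show altStep (best, run, some c) c = (max best (run + 1), run + 1, some c) by
        simp [altStep]; omega]
    rw [ih _ _ (le_max_right _ _)]
    simp only [Prod.mk.injEq]
    exact ⟨by push_cast; omega, by push_cast; omega, trivial⟩

lemma altStep_replicate (c : Char) : ∀ (k : Nat) (best run : Int) (prev : Option Char),
    prev ≠ some c → 0 < k →
    (List.replicate k c).foldl altStep (best, run, prev) = (max best (k : Int), (k : Int), some c) := by
  intro k best run prev hprev hk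
  obtain ⟨j, rfl⟩ : ∃ j, k = j + 1 := ⟨k - 1, by omega⟩
  rw [List.replicate_succ, List.foldl_cons,
    show altStep (best, run, prev) c = (max best 1, 1, some c) by
      simp [altStep, Ne.symm hprev]; omega]
  rw [altStep_run c j _ _ (le_max_right _ _)]
  simp only [Prod.mk.injEq]
  exact ⟨by push_cast; omega, by push_cast; omega, trivial⟩

-- B's whole scan computes the max of the four counts
-- B's scan over a list of distinct-character blocks returns the max of the incoming best and the block sizes
lemma blocks_scan : ∀ (bs : List (Nat × Char)) (st : Int × Int × Option Char),
    0 ≤ st.1 → (∀ p ∈ bs, st.2.2 ≠ some p.2) → bs.Pairwise (fun p q => p.2 ≠ q.2) →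
    ((bs.foldl (fun s p => (List.replicate p.1 p.2).foldl altStep s) st)).1 =
      bs.foldl (fun m p => max m (p.1 : Int)) st.1 := by
  intro bs
  induction bs with
  | nil => intro st _ _ _; rfl
  | cons p t ih =>
    intro st hst hne hpw
    rw [List.foldl_cons, List.foldl_cons]
    rcases Nat.eq_zero_or_pos p.1 with h0 | hpos
    · rw [h0, List.replicate_zero, List.foldl_nil]
      rw [ih st hst (fun q hq => hne q (List.mem_cons_of_mem p hq)) (List.Pairwise.of_cons hpw)]
      congr 1
      push_cast; omega
    · rw [altStep_replicate p.2 p.1 st.1 st.2.1 st.2.2 (hne p (List.mem_cons_self ..)) hpos]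
      rw [ih (max st.1 (p.1 : Int), (p.1 : Int), some p.2) (by positivity)
        (by intro q hq; simp only []; exact fun hc => (List.rel_of_pairwise_cons hpw hq) (by injection hc))
        (List.Pairwise.of_cons hpw)]

lemma alt_scan (a b c d : Nat) :
    ((List.replicate a '<' ++ List.replicate b '>' ++ List.replicate c '^' ++
      List.replicate d 'v').foldl altStep ((0 : Int), (0 : Int), (none : Option Char))).1 =
      max (max (max (a : Int) b) c) d := by
  have h := blocks_scan [(a, '<'), (b, '>'), (c, '^'), (d, 'v')] (0, 0, none)
    (le_refl 0) (by intro p hp; simp) (by simp [List.pairwise_cons])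
  simp only [List.foldl_cons, List.foldl_nil] at h
  rw [List.foldl_append, List.foldl_append, List.foldl_append, h]
  omega

-- ===== VERDICT (by name: the statement is the Claim_ definition above) =====
theorem solution_spec : Claim_equal_solution := by
  intro S _
  unfold Spec_solution solution solution_alt
  dsimp only []
  rw [solution_loop S.toList 0 0 0 0, sorted_arrows S.toList, alt_scan]
  rw [show (PySem.Dict.ofList [('<', (0:Int) + S.toList.count '<'), ('>', 0 + S.toList.count '>'),
      ('^', 0 + S.toList.count '^'), ('v', 0 + S.toList.count 'v')]).values =
      [(0:Int) + S.toList.count '<', 0 + S.toList.count '>', 0 + S.toList.count '^',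
       0 + S.toList.count 'v'] from rfl]
  rw [PySem.List.max?_id_cons]
  simp only [List.foldl_cons, List.foldl_nil, Option.getD_some, zero_add]
  split_ifs with h
  · omega
  · rfl
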